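-- pv_equiv track=rewrite | github.com/sofia285/FP | proj2.py | aux_obter_movimento
-- ===== SOURCE A (Python) =====
-- def obter_pos_x(p):
--     '''
--     Devolve o valor correspondente ao x da posição
--     (posição --> int)
--     '''
--     return p[0]
--
-- def obter_pos_y(p):
--     '''
--     Devolve o valor correspondente ao y da posição
--     (posição --> int)
--     '''
--     return p[1]
--
-- def obter_posicoes_adjacentes(p):
--     '''
--     Obtém as posições válidas que se encontram à volta da posição inserida
--     (posição --> tuple)
--     '''
--     l=[(obter_pos_x(p),obter_pos_y(p)-1),(obter_pos_x(p)+1,obter_pos_y(p)),(obter_pos_x(p),obter_pos_y(p)+1),(obter_pos_x(p)-1,obter_pos_y(p))]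
--     l2=()
--     for i in range(0,len(l)):
--         if l[i][0]>=0 and l[i][1]>=0:
--             l2+=(l[i],)
--     return l2
--
-- def aux_obter_movimento(m,p):
--     '''
--     Função auxiliar da função 'obter_movimento'
--     (prado,posição --> posição)
--     '''
--     p2=list(obter_posicoes_adjacentes(p))
--     d=len(p2)
--     p3=[]
--     for i in range(0,d):
--         if obter_pos_x(p2[i])!=0 and obter_pos_y(p2[i])!=0:
--             p3+=[p2[i]]
--     return p3
-- ===== SOURCE B (Python) =====
-- def aux_obter_movimento(m, p):
--     # Decision table: each neighbour is appended under a condition stated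
--     # directly on the original point (x, y); no candidate list, no filter.
--     x, y = p[0], p[1]
--     out = []
--     if x > 0 and y > 1:
--         out.append((x, y - 1))
--     if x >= 0 and y > 0:
--         out.append((x + 1, y))
--     if x > 0 and y >= 0:
--         out.append((x, y + 1))
--     if x > 1 and y > 0:
--         out.append((x - 1, y))
--     return out
-- ===== Notes on version B (the rewrite author's own statement) =====
-- stated objective: alternative
-- what changed: Replaces A's generate-then-filter (build 4 neighbour tuples, two staged filtering loops) by a decision table: four independent conditionals on the original coordinates x,y, each pre-solved (e.g. the down-neighbour survives iff x>0 and y>1), appending the neighbour directly with no intermediate candidate list and no filter pass.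
import Mathlib
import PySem

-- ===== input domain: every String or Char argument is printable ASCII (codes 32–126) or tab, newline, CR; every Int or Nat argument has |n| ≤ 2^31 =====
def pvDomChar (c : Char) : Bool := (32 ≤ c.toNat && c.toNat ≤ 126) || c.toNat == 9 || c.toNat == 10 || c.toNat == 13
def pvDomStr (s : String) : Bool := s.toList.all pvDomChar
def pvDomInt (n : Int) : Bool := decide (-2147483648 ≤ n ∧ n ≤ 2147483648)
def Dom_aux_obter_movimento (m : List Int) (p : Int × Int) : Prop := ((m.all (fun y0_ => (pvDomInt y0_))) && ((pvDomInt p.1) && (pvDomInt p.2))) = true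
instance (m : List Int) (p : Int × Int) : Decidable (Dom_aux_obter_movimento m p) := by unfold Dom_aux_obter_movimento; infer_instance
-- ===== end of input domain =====

-- B replaces A's generate-then-filter by a decision table: four conditionals on the
-- original coordinates, each appending its neighbour directly (objective: alternative).

-- ===== PORT A =====
def obter_pos_x (p : Int × Int) : Int := p.1

def obter_pos_y (p : Int × Int) : Int := p.2

def obter_posicoes_adjacentes (p : Int × Int) : List (Int × Int) :=
  let l : List (Int × Int) :=
    [(obter_pos_x p, obter_pos_y p - 1), (obter_pos_x p + 1, obter_pos_y p),
     (obter_pos_x p, obter_pos_y p + 1), (obter_pos_x p - 1, obter_pos_y p)]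
  -- 'l2 = (); for i in range(0,len(l)): if …: l2 += (l[i],)'
  (PySem.List.pyRange 0 (l.length : Int) 1).foldl (fun l2 i =>
    let q := PySem.List.pyGetD l i (0, 0)
    if obter_pos_x q ≥ 0 ∧ obter_pos_y q ≥ 0 then l2 ++ [q] else l2) []

def aux_obter_movimento (m : List Int) (p : Int × Int) : List (Int × Int) :=
  let p2 := obter_posicoes_adjacentes p
  let d : Int := (p2.length : Int)
  (PySem.List.pyRange 0 d 1).foldl (fun p3 i =>
    let q := PySem.List.pyGetD p2 i (0, 0)
    if obter_pos_x q ≠ 0 ∧ obter_pos_y q ≠ 0 then p3 ++ [q] else p3) []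

-- ===== PORT B =====
def aux_obter_movimento_alt (m : List Int) (p : Int × Int) : List (Int × Int) :=
  let x := p.1
  let y := p.2
  let out : List (Int × Int) := []
  let out := if x > 0 ∧ y > 1 then out ++ [(x, y - 1)] else out
  let out := if x ≥ 0 ∧ y > 0 then out ++ [(x + 1, y)] else out
  let out := if x > 0 ∧ y ≥ 0 then out ++ [(x, y + 1)] else out
  let out := if x > 1 ∧ y > 0 then out ++ [(x - 1, y)] else out
  out

-- ===== PRECONDITION & SPEC =====
def Spec_aux_obter_movimento (m : List Int) (p : Int × Int) (out : List (Int × Int)) : Prop := out = aux_obter_movimento_alt m p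
instance (m : List Int) (p : Int × Int) (out : List (Int × Int)) : Decidable (Spec_aux_obter_movimento m p out) := by unfold Spec_aux_obter_movimento; infer_instance

-- ===== CLAIM (what is proved, stated in full; the proofs are below) =====
def Claim_equal_aux_obter_movimento : Prop := ∀ (m : List Int) (p : Int × Int), Dom_aux_obter_movimento m p → Spec_aux_obter_movimento m p (aux_obter_movimento m p)

-- ===== LEMMAS AND PROOFS =====

-- each of A's index loops over the whole list is a filter
lemma foldl_idx_filter (xs : List (Int × Int)) (P : Int × Int → Prop) [DecidablePred P] :
    (PySem.List.pyRange 0 (xs.length : Int) 1).foldl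
      (fun acc i => if P (PySem.List.pyGetD xs i (0, 0)) then acc ++ [PySem.List.pyGetD xs i (0, 0)] else acc) [] =
    xs.filter (fun q => decide (P q)) := by
  rw [PySem.List.foldl_pyRange_zero_pyGetD' xs (0, 0) (fun acc q => if P q then acc ++ [q] else acc) []]
  simpa using PySem.List.foldl_append_ite_eq_filter P (l := xs) (acc := [])

set_option maxHeartbeats 1000000 in
theorem aux_obter_movimento_spec_aux (m : List Int) (p : Int × Int) :
    aux_obter_movimento m p = aux_obter_movimento_alt m p := by
  simp only [aux_obter_movimento, obter_posicoes_adjacentes, obter_pos_x, obter_pos_y]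
  rw [foldl_idx_filter [(p.1, p.2 - 1), (p.1 + 1, p.2), (p.1, p.2 + 1), (p.1 - 1, p.2)]
        (fun q => q.1 ≥ 0 ∧ q.2 ≥ 0)]
  rw [foldl_idx_filter _ (fun q => q.1 ≠ 0 ∧ q.2 ≠ 0)]
  rw [List.filter_filter]
  simp only [aux_obter_movimento_alt, List.filter_cons, List.filter_nil,
    Bool.and_eq_true, decide_eq_true_eq]
  split_ifs <;> first | rfl | (exfalso; omega)

-- ===== VERDICT (by name: the statement is the Claim_ definition above) =====
theorem aux_obter_movimento_spec : Claim_equal_aux_obter_movimento := by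
  intro m p _
  exact aux_obter_movimento_spec_aux m p
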